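-- pv_equiv track=rewrite | github.com/bhigley/CPSC322_finalProject | mysklearn_ben/myutils_ben.py | group_by_multiple_atts
-- ===== SOURCE A (Python) =====
-- def group_by_multiple_atts(indexes, y):
--     """Groups data based on multiple attributes
--
--         Args:
--             indexes: list of ints
--             y :v alues
--
--         Returns:
--             grouped indexes
--
--         Notes:
--             needed for naive predict
--         """
--     groups = []
--     group_indexes = []
--     for item in y:
--         if item not in groups:
--             groups.append(item)
--             group_indexes.append([])
--     groups.sort()
--     i = 0
--     for item in y:
--         for j in range(len(groups)):
--             if item == groups[j]:
--                 group_indexes[j].append(indexes[i])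
--         i += 1
--     return group_indexes
-- ===== SOURCE B (Python) =====
-- def group_by_multiple_atts(indexes, y):
--     pairs = sorted(zip(y, indexes), key=lambda p: p[0])
--     out = []
--     prev = None
--     for v, idx in pairs:
--         if not out or v != prev:
--             out.append([idx])
--         else:
--             out[-1].append(idx)
--         prev = v
--     return out
-- ===== Notes on version B (the rewrite author's own statement) =====
-- stated objective: faster
-- what changed: B sorts the (y, index) pairs once with Python's stable sort and then splits the sorted sequence into runs of equal y in a single linear scan, instead of A's membership-scan group list plus nested item-by-group matching loop.
import Mathlib
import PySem

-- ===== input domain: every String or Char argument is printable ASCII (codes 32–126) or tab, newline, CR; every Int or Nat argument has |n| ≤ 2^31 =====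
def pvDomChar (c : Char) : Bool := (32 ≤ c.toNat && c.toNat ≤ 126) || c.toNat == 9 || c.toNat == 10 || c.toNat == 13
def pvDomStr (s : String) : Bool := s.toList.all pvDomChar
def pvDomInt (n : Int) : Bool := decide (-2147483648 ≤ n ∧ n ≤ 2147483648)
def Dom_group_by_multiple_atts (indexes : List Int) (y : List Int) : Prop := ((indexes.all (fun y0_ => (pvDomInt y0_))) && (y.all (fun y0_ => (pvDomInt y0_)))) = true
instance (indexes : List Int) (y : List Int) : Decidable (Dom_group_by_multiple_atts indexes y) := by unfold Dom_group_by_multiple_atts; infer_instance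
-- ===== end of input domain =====

-- B stable-sorts the (y, index) pairs once and splits the sorted list into runs of equal y in one
-- linear scan, replacing A's membership-scan group building and nested item×group matching loop
-- (objective: faster).

-- ===== PORT A =====
-- literal port of A: first loop builds (groups, group_indexes); groups.sort(); then the counter
-- loop with the inner scan over range(len(groups)). indexes[i] (an IndexError when
-- i ≥ len(indexes)) is ported with the total form pyGetD, exact under Pre_ below.
def group_by_multiple_atts (indexes : List Int) (y : List Int) : List (List Int) :=
  let st := y.foldl (fun (st : List Int × List (List Int)) item =>
      if item ∈ st.1 then st else (st.1 ++ [item], st.2 ++ [([] : List Int)])) ([], [])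
  let groups := PySem.List.sorted st.1 (fun x => x) false
  let fin := y.foldl (fun (acc : List (List Int) × Int) item =>
      ((PySem.List.pyRange 0 (groups.length : Int) 1).foldl (fun gi j =>
          if item = PySem.List.pyGetD groups j 0 then
            PySem.List.pySetD gi j (PySem.List.pyGetD gi j [] ++ [PySem.List.pyGetD indexes acc.2 0])
          else gi) acc.1, acc.2 + 1)) (st.2, (0 : Int))
  fin.1

-- ===== PORT B =====
-- one step of Source B's run-splitting loop body: 'if not out or v != prev: out.append([idx])
-- else: out[-1].append(idx); prev = v'  (prev starts as None → Option Int; an int is never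
-- equal to None, so 'v != prev' is 'st.2 ≠ some p.1'; out[-1].append = replace the last list)
def bStep (st : List (List Int) × Option Int) (p : Int × Int) : List (List Int) × Option Int :=
  if st.1 = [] ∨ st.2 ≠ some p.1 then (st.1 ++ [[p.2]], some p.1)
  else (st.1.dropLast ++ [st.1.getLastD [] ++ [p.2]], some p.1)

-- literal port of Source B: pairs = sorted(zip(y, indexes), key=lambda p: p[0]) (stable), then the
-- run-splitting scan with state (out, prev)
def group_by_multiple_atts_alt (indexes : List Int) (y : List Int) : List (List Int) :=
  let pairs := PySem.List.sorted (y.zip indexes) (fun p => p.1) false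
  (pairs.foldl bStep ([], none)).1

-- ===== PRECONDITION & SPEC =====
-- Pre_: A raises IndexError (indexes[i]) as soon as len(y) > len(indexes).
def Pre_group_by_multiple_atts (indexes : List Int) (y : List Int) : Prop :=
  y.length ≤ indexes.length
instance (indexes : List Int) (y : List Int) : Decidable (Pre_group_by_multiple_atts indexes y) := by unfold Pre_group_by_multiple_atts; infer_instance

def pvWitness_group_by_multiple_atts : List Int × List Int := ([7, 8, 9], [2, 1, 2])

def Spec_group_by_multiple_atts (indexes : List Int) (y : List Int) (out : List (List Int)) : Prop := out = group_by_multiple_atts_alt indexes y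
instance (indexes : List Int) (y : List Int) (out : List (List Int)) : Decidable (Spec_group_by_multiple_atts indexes y out) := by unfold Spec_group_by_multiple_atts; infer_instance

-- ===== CLAIM (what is proved, stated in full; the proofs are below) =====
def Claim_equal_group_by_multiple_atts : Prop := ∀ (indexes : List Int) (y : List Int), Dom_group_by_multiple_atts indexes y → Pre_group_by_multiple_atts indexes y → Spec_group_by_multiple_atts indexes y (group_by_multiple_atts indexes y)

-- ===== LEMMAS AND PROOFS =====

-- the common normal form: for each value v, the indexes (by position) whose y-entry is v
def pvGrp (indexes y : List Int) (v : Int) : List Int :=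
  ((PySem.List.enumerate y 0).filter (fun p => p.2 == v)).map
    (fun p => PySem.List.pyGetD indexes p.1 0)

-- ---------- A-side (unchanged normal-form proof) ----------

lemma a_first_loop (y : List Int) : ∀ (g : List Int),
    y.foldl (fun (st : List Int × List (List Int)) item =>
        if item ∈ st.1 then st else (st.1 ++ [item], st.2 ++ [([] : List Int)]))
      (g, List.replicate g.length [])
    = (PySem.Set.update g y, List.replicate (PySem.Set.update g y).length []) := by
  induction y with
  | nil => intro g; simp [PySem.Set.update]
  | cons x xs ih =>
    intro g
    rw [List.foldl_cons, PySem.Set.update_cons]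
    by_cases hx : x ∈ g
    · have hadd : PySem.Set.add g x = g := by
        unfold PySem.Set.add
        simp [hx]
      simp only [if_pos hx, hadd]
      exact ih g
    · have hadd : PySem.Set.add g x = g ++ [x] := by
        unfold PySem.Set.add
        simp [hx]
      simp only [if_neg hx, hadd]
      have := ih (g ++ [x])
      simpa [List.replicate_succ'] using this

-- inner loop over range m, setting position k when c k holds
lemma foldl_range_set (c : Nat → Bool) (u : List Int → List Int) :
    ∀ (m : Nat) (gi : List (List Int)), m ≤ gi.length →
      (List.range m).foldl (fun g k => if c k then g.set k (u (g.getD k [])) else g) gi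
        = gi.mapIdx (fun k v => if k < m ∧ c k = true then u v else v) := by
  intro m
  induction m with
  | zero =>
    intro gi _
    simp only [List.range_zero, List.foldl_nil]
    refine (List.ext_getElem (by simp) ?_).symm
    intro k h1 h2
    simp
  | succ m ih =>
    intro gi h
    rw [List.range_succ, List.foldl_append, List.foldl_cons, List.foldl_nil,
        ih gi (Nat.le_of_succ_le h)]
    have hlen : (gi.mapIdx (fun k v => if k < m ∧ c k = true then u v else v)).length = gi.length := by
      simp
    cases hc : c m with
    | false =>
      simp only [Bool.false_eq_true, if_false]
      refine List.ext_getElem (by simp) ?_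
      intro k h1 h2
      simp only [List.getElem_mapIdx]
      have : (k < m ∧ c k = true) ↔ (k < m + 1 ∧ c k = true) := by
        constructor
        · rintro ⟨h3, h4⟩; exact ⟨Nat.lt_succ_of_lt h3, h4⟩
        · rintro ⟨h3, h4⟩
          rcases Nat.lt_succ_iff_lt_or_eq.1 h3 with h5 | h5
          · exact ⟨h5, h4⟩
          · subst h5; rw [hc] at h4; cases h4
      by_cases hk : k < m ∧ c k = true
      · rw [if_pos hk, if_pos (this.1 hk)]
      · rw [if_neg hk, if_neg (fun hx => hk (this.2 hx))]
    | true =>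
      simp only [if_true]
      have hm : m < gi.length := h
      have hgd : (gi.mapIdx (fun k v => if k < m ∧ c k = true then u v else v)).getD m []
          = gi[m] := by
        rw [List.getD_eq_getElem _ _ (by simpa using hm), List.getElem_mapIdx]
        simp
      rw [hgd]
      refine List.ext_getElem (by simp) ?_
      intro k h1 h2
      rw [List.getElem_set]
      by_cases hk : m = k
      · subst hk
        simp [List.getElem_mapIdx, hc]
      · rw [if_neg hk]
        simp only [List.getElem_mapIdx]
        by_cases h6 : k < m ∧ c k = true
        · rw [if_pos h6, if_pos ⟨by omega, h6.2⟩]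
        · have h7 : ¬ (k < m + 1 ∧ c k = true) := by
            rintro ⟨h8, h9⟩
            exact h6 ⟨by omega, h9⟩
          rw [if_neg h6, if_neg h7]

-- the inner range(len(groups)) scan, in mapIdx form
lemma inner_eq (ks : List Int) (item idx : Int) (gi : List (List Int))
    (h : ks.length ≤ gi.length) :
    (PySem.List.pyRange 0 (ks.length : Int) 1).foldl (fun gi j =>
        if item = PySem.List.pyGetD ks j 0 then
          PySem.List.pySetD gi j (PySem.List.pyGetD gi j [] ++ [idx])
        else gi) gi
    = gi.mapIdx (fun k v => if k < ks.length ∧ item = ks.getD k 0 then v ++ [idx] else v) := by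
  rw [PySem.List.pyRange_one, List.foldl_map]
  have hn : ((ks.length : Int) - 0).toNat = ks.length := by omega
  rw [hn]
  have hfold := foldl_range_set (fun k => decide (item = ks.getD k 0)) (· ++ [idx]) ks.length gi h
  have hfun : (fun (x : List (List Int)) (y : Nat) =>
      if item = PySem.List.pyGetD ks (0 + (y : Int)) 0 then
        PySem.List.pySetD x (0 + (y : Int)) (PySem.List.pyGetD x (0 + (y : Int)) [] ++ [idx])
      else x)
      = (fun (g : List (List Int)) (k : Nat) =>
          if (fun k => decide (item = ks.getD k 0)) k = true then g.set k ((· ++ [idx]) (g.getD k [])) else g) := by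
    funext g k
    simp [PySem.List.pyGetD_natCast, PySem.List.pySetD_natCast]
  rw [hfun, hfold]
  refine List.ext_getElem (by simp) ?_
  intro k h1 h2
  simp only [List.getElem_mapIdx, decide_eq_true_eq]

-- the counter loop, rewritten over enumerate with the inner scan in mapIdx form
lemma a_second_loop (indexes ks : List Int) :
    ∀ (y : List Int) (gi : List (List Int)) (i0 : Int), gi.length = ks.length →
    (y.foldl (fun (acc : List (List Int) × Int) item =>
        ((PySem.List.pyRange 0 (ks.length : Int) 1).foldl (fun gi j =>
            if item = PySem.List.pyGetD ks j 0 then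
              PySem.List.pySetD gi j (PySem.List.pyGetD gi j [] ++ [PySem.List.pyGetD indexes acc.2 0])
            else gi) acc.1, acc.2 + 1)) (gi, i0)).1
    = (PySem.List.enumerate y i0).foldl
        (fun gi p => gi.mapIdx (fun k v =>
          if k < ks.length ∧ p.2 = ks.getD k 0 then v ++ [PySem.List.pyGetD indexes p.1 0] else v)) gi := by
  intro y
  induction y with
  | nil => intro gi i0 _; simp [PySem.List.enumerate_nil]
  | cons x xs ih =>
    intro gi i0 hlen
    rw [List.foldl_cons, PySem.List.enumerate_cons, List.foldl_cons]
    have hin := inner_eq ks x (PySem.List.pyGetD indexes i0 0) gi (le_of_eq hlen.symm)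
    simp only [hin]
    exact ih _ (i0 + 1) (by simp [hlen])

-- folding pointwise appends commutes into a single filter per position
lemma foldl_mapIdx_filter (P : (Int × Int) → Nat → Prop) [∀ p k, Decidable (P p k)]
    (w : Int × Int → Int) :
    ∀ (l : List (Int × Int)) (gi : List (List Int)),
    l.foldl (fun gi p => gi.mapIdx (fun k v => if P p k then v ++ [w p] else v)) gi
    = gi.mapIdx (fun k v => v ++ (l.filter (fun p => decide (P p k))).map w) := by
  intro l
  induction l with
  | nil =>
    intro gi
    refine (List.ext_getElem (by simp) ?_).symm
    intro k h1 h2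
    simp
  | cons p l ih =>
    intro gi
    rw [List.foldl_cons, ih, List.mapIdx_mapIdx]
    refine List.ext_getElem (by simp) ?_
    intro k h1 h2
    simp only [List.getElem_mapIdx, Function.comp]
    by_cases hp : P p k
    · simp [hp, List.append_assoc]
    · simp [hp]

lemma a_eq_spec (indexes y : List Int) :
    group_by_multiple_atts indexes y
      = (PySem.List.sorted (PySem.Set.ofList y) (fun x => x) false).map (pvGrp indexes y) := by
  unfold group_by_multiple_atts
  have h0 := a_first_loop y []
  simp only [List.length_nil, List.replicate_zero, PySem.Set.update_nil_left] at h0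
  simp only [h0]
  set ks := PySem.List.sorted (PySem.Set.ofList y) (fun x => x) false with hks
  have hm : (PySem.Set.ofList y).length = ks.length := by
    rw [hks, PySem.List.length_sorted]
  rw [hm]
  rw [a_second_loop indexes ks y (List.replicate ks.length []) 0 (by simp)]
  rw [foldl_mapIdx_filter (fun p k => k < ks.length ∧ p.2 = ks.getD k 0)
      (fun p => PySem.List.pyGetD indexes p.1 0) (PySem.List.enumerate y 0)
      (List.replicate ks.length [])]
  refine List.ext_getElem (by simp) ?_
  intro k h1 h2
  simp only [List.getElem_mapIdx, List.getElem_replicate, List.getElem_map, List.nil_append]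
  unfold pvGrp
  rw [List.map_inj_left.2 (fun p _ => rfl)]
  congr 1
  refine List.filter_congr ?_
  intro p _
  have hk : k < ks.length := by simpa using h1
  simp only [hk, true_and, List.getD_eq_getElem ks 0 hk]
  rfl

-- ---------- B-side ----------

-- insertion of a key into a strictly increasing key list (proof-side mirror of where the
-- stable sort puts a new key)
def insKey (k : Int) : List Int → List Int
  | [] => [k]
  | v :: vs => if k < v then k :: v :: vs else if k = v then v :: vs else v :: insKey k vs

lemma mem_insKey (k a : Int) : ∀ l : List Int, a ∈ insKey k l ↔ a = k ∨ a ∈ l := by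
  intro l
  induction l with
  | nil => simp [insKey]
  | cons v vs ih =>
    by_cases h1 : k < v
    · simp [insKey, h1]
    · by_cases h2 : k = v
      · subst h2; simp [insKey]
      · simp [insKey, h1, h2, ih]
        tauto

lemma insKey_pairwise (k : Int) : ∀ l : List Int, l.Pairwise (· < ·) → (insKey k l).Pairwise (· < ·) := by
  intro l
  induction l with
  | nil => intro _; simp [insKey]
  | cons v vs ih =>
    intro hpw
    rw [List.pairwise_cons] at hpw
    by_cases h1 : k < v
    · simp only [insKey, if_pos h1]
      refine List.pairwise_cons.2 ⟨?_, List.pairwise_cons.2 hpw⟩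
      intro b hb
      rcases List.mem_cons.1 hb with h | h
      · omega
      · have := hpw.1 b h
        omega
    · by_cases h2 : k = v
      · simpa [insKey, h1, h2] using List.pairwise_cons.2 hpw
      · simp only [insKey, if_neg h1, if_neg h2]
        refine List.pairwise_cons.2 ⟨?_, ih hpw.2⟩
        intro b hb
        rcases (mem_insKey k b vs).1 hb with h | h
        · omega
        · exact hpw.1 b h

lemma insKey_of_mem (k : Int) : ∀ l : List Int, l.Pairwise (· < ·) → k ∈ l → insKey k l = l := by
  intro l
  induction l with
  | nil => intro _ h; cases h
  | cons v vs ih =>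
    intro hpw hmem
    rw [List.pairwise_cons] at hpw
    rcases List.mem_cons.1 hmem with h | h
    · simp [insKey, h]
    · have hkv : v < k := hpw.1 k h
      have h1 : ¬ k < v := by omega
      have h2 : k ≠ v := by omega
      simp [insKey, h1, h2, ih hpw.2 h]

lemma insKey_perm_of_not_mem (k : Int) : ∀ l : List Int, k ∉ l → (insKey k l).Perm (l ++ [k]) := by
  intro l
  induction l with
  | nil => intro _; simp [insKey]
  | cons v vs ih =>
    intro hmem
    have hk : k ≠ v := fun h => hmem (h ▸ List.mem_cons_self)
    by_cases h1 : k < v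
    · simp only [insKey, if_pos h1]
      exact (List.perm_append_singleton k (v :: vs)).symm
    · simp only [insKey, if_neg h1, if_neg hk]
      exact List.Perm.cons v (ih (fun h => hmem (List.mem_cons_of_mem v h)))

-- where Python's stable sort puts a new key: sorted(set(zs + [k])) = insKey k (sorted(set(zs)))
lemma keys_snoc (zs : List Int) (k : Int) :
    PySem.List.sorted (PySem.Set.ofList (zs ++ [k])) (fun x => x) false
      = insKey k (PySem.List.sorted (PySem.Set.ofList zs) (fun x => x) false) := by
  have hset : PySem.Set.ofList (zs ++ [k]) = PySem.Set.add (PySem.Set.ofList zs) k := by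
    rw [PySem.Set.ofList_eq_foldl, PySem.Set.ofList_eq_foldl, List.foldl_append]
    simp
  rw [hset]
  refine PySem.List.sorted_eq_of_perm_of_pairwise_lt _ _ _ ?_ ?_
  · by_cases hk : k ∈ PySem.Set.ofList zs
    · have hadd : PySem.Set.add (PySem.Set.ofList zs) k = PySem.Set.ofList zs := by
        unfold PySem.Set.add
        simp [PySem.Set.contains, hk]
      rw [hadd, insKey_of_mem k _ (PySem.List.sorted_ofList_pairwise_lt zs)
            ((PySem.List.mem_sorted _ _ _ _).2 hk)]
      exact PySem.List.sorted_perm _ _ _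
    · have hadd : PySem.Set.add (PySem.Set.ofList zs) k = PySem.Set.ofList zs ++ [k] := by
        unfold PySem.Set.add
        simp [PySem.Set.contains, hk]
      rw [hadd]
      refine (insKey_perm_of_not_mem k _ (fun h => hk ((PySem.List.mem_sorted _ _ _ _).1 h))).trans ?_
      exact (PySem.List.sorted_perm _ _ _).append_right [k]
  · exact insKey_pairwise k _ (PySem.List.sorted_ofList_pairwise_lt zs)

-- insertBy passes over a prefix it compares as not-before
lemma insertBy_pass (before : Int × Int → Int × Int → Bool) (x : Int × Int) :
    ∀ (bl rest : List (Int × Int)), (∀ q ∈ bl, before x q = false) →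
      PySem.List.insertBy before x (bl ++ rest) = bl ++ PySem.List.insertBy before x rest := by
  intro bl
  induction bl with
  | nil => intro rest _; simp
  | cons q bl ih =>
    intro rest h
    have hq : before x q = false := h q List.mem_cons_self
    simp only [List.cons_append, PySem.List.insertBy, hq, Bool.false_eq_true, if_false]
    rw [ih rest (fun r hr => h r (List.mem_cons_of_mem q hr))]

lemma insertBy_front (before : Int × Int → Int × Int → Bool) (x : Int × Int) :
    ∀ rest : List (Int × Int), (∀ q ∈ rest, before x q = true) →
      PySem.List.insertBy before x rest = x :: rest := by
  intro rest h
  cases rest with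
  | nil => simp [PySem.List.insertBy]
  | cons q qs => simp [PySem.List.insertBy, h q List.mem_cons_self]

-- blocks whose key is not k are unchanged by the "append to block k" update
lemma flatMap_if_skip (x : Int × Int) (F : Int → List (Int × Int)) (k : Int) :
    ∀ l : List Int, (∀ w ∈ l, w ≠ k) →
      l.flatMap (fun w => F w ++ if w = k then [x] else []) = l.flatMap F := by
  intro l
  induction l with
  | nil => intro _; simp
  | cons a l ih =>
    intro h
    rw [List.flatMap_cons, List.flatMap_cons, if_neg (h a List.mem_cons_self),
      ih (fun w hw => h w (List.mem_cons_of_mem a hw))]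
    simp

-- the key stability fact: inserting x into a concatenation of nonempty constant-key blocks
-- in strictly increasing key order appends x to its key's block
lemma insert_blocks (x : Int × Int) (F : Int → List (Int × Int)) :
    ∀ ks : List Int, ks.Pairwise (· < ·) →
      (∀ v ∈ ks, (∀ p ∈ F v, p.1 = v) ∧ F v ≠ []) →
      (x.1 ∉ ks → F x.1 = []) →
      PySem.List.insertBy (fun a b => decide (a.1 < b.1)) x (ks.flatMap F)
        = (insKey x.1 ks).flatMap (fun v => F v ++ if v = x.1 then [x] else []) := by
  intro ks
  induction ks with
  | nil =>
    intro _ _ hnew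
    simp [insKey, PySem.List.insertBy, hnew (by simp)]
  | cons v vs ih =>
    intro hpw hF hnew
    rw [List.pairwise_cons] at hpw
    have hFv := hF v List.mem_cons_self
    have hkeyv : ∀ p ∈ F v, p.1 = v := hFv.1
    by_cases h1 : x.1 < v
    · -- x's key is new and smallest: x goes in front
      obtain ⟨p, bl, hbl⟩ : ∃ p bl, F v = p :: bl := by
        cases hE : F v with
        | nil => exact absurd hE hFv.2
        | cons p bl => exact ⟨p, bl, rfl⟩
      have hxlt : ∀ w ∈ v :: vs, x.1 < w := by
        intro w hw
        rcases List.mem_cons.1 hw with h | h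
        · omega
        · have := hpw.1 w h; omega
      have hFk : F x.1 = [] := hnew (fun h => by have := hxlt x.1 h; omega)
      have hL : (v :: vs).flatMap F = p :: (bl ++ vs.flatMap F) := by
        simp [hbl]
      rw [hL]
      have hp1 : p.1 = v := hkeyv p (by simp [hbl])
      simp only [insKey, if_pos h1]
      rw [List.flatMap_cons,
        flatMap_if_skip x F x.1 (v :: vs) (fun w hw h => by have := hxlt w hw; omega)]
      simp only [PySem.List.insertBy, hp1, h1, decide_true, if_true]
      rw [hFk, hL]
      simp
    · by_cases h2 : x.1 = v
      · -- x's key is the head block's: x goes right after that block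
        have hpassv : ∀ q ∈ F v, (fun a b : Int × Int => decide (a.1 < b.1)) x q = false := by
          intro q hq
          have := hkeyv q hq
          simp [this, h2]
        have hfront : ∀ q ∈ vs.flatMap F, (fun a b : Int × Int => decide (a.1 < b.1)) x q = true := by
          intro q hq
          obtain ⟨w, hw, hqw⟩ := List.mem_flatMap.1 hq
          have hq1 : q.1 = w := (hF w (List.mem_cons_of_mem v hw)).1 q hqw
          have : v < w := hpw.1 w hw
          simp [hq1, h2]
          omega
        rw [List.flatMap_cons, insertBy_pass _ x (F v) (vs.flatMap F) hpassv,
          insertBy_front _ x (vs.flatMap F) hfront]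
        simp only [insKey, if_neg h1, if_pos h2, List.flatMap_cons, if_pos h2.symm]
        rw [flatMap_if_skip x F x.1 vs (fun w hw h => by have := hpw.1 w hw; omega)]
        simp
      · -- x's key is larger: pass the head block and recurse
        have hvx : v < x.1 := by omega
        have hpassv : ∀ q ∈ F v, (fun a b : Int × Int => decide (a.1 < b.1)) x q = false := by
          intro q hq
          have := hkeyv q hq
          simp [this]
          omega
        rw [List.flatMap_cons, insertBy_pass _ x (F v) (vs.flatMap F) hpassv,
          ih hpw.2 (fun w hw => hF w (List.mem_cons_of_mem v hw))
            (fun h => hnew (fun hm => by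
              rcases List.mem_cons.1 hm with hh | hh
              · exact h2 hh
              · exact h hh))]
        simp only [insKey, if_neg h1, if_neg h2, List.flatMap_cons, if_neg (fun h : v = x.1 => h2 h.symm)]
        simp

-- stability of the sort, in block form: sorted(pairs, key=fst) is the concatenation, over the
-- sorted distinct keys, of the original-order sublists with that key
lemma sorted_pairs_blocks :
    ∀ l : List (Int × Int),
      PySem.List.sorted l (fun p => p.1) false
        = (PySem.List.sorted (PySem.Set.ofList (l.map Prod.fst)) (fun x => x) false).flatMap
            (fun v => l.filter (fun p => decide (p.1 = v))) := by
  intro l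
  induction l using List.reverseRecOn with
  | nil => simp [PySem.List.sorted]
  | append_singleton m x ih =>
    rw [PySem.List.sorted_eq_foldl_insertBy, List.foldl_append, List.foldl_cons, List.foldl_nil,
      ← PySem.List.sorted_eq_foldl_insertBy, ih]
    rw [insert_blocks x (fun v => m.filter (fun p => decide (p.1 = v))) _
      (PySem.List.sorted_ofList_pairwise_lt _)
      (fun v hv => by
        constructor
        · intro p hp
          have hp' : p ∈ m.filter (fun q => decide (q.1 = v)) := hp
          exact of_decide_eq_true ((List.mem_filter.1 hp').2)
        · have hv2 : v ∈ m.map Prod.fst :=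
            (PySem.Set.mem_ofList _ _).1 ((PySem.List.mem_sorted _ _ _ _).1 hv)
          obtain ⟨p, hp, hpv⟩ := List.mem_map.1 hv2
          have : p ∈ m.filter (fun q => decide (q.1 = v)) :=
            List.mem_filter.2 ⟨hp, decide_eq_true hpv⟩
          exact List.ne_nil_of_mem this)
      (fun h => by
        rw [List.filter_eq_nil_iff]
        intro p hp
        simp only [decide_eq_true_eq]
        intro hpx
        exact h ((PySem.List.mem_sorted _ _ _ _).2
          ((PySem.Set.mem_ofList _ _).2 (List.mem_map.2 ⟨p, hp, hpx⟩))))]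
    rw [List.map_append, ← keys_snoc]
    simp only [List.map_cons, List.map_nil]
    refine List.flatMap_congr (fun v _ => ?_)
    rw [List.filter_append]
    by_cases h : v = x.1
    · simp [h]
    · have : ¬ (x.1 = v) := fun hh => h hh.symm
      simp [h, this]

-- within a run of equal keys the scan appends each index to the current (last) group
lemma b_run (v : Int) :
    ∀ (bl : List (Int × Int)), (∀ p ∈ bl, p.1 = v) → ∀ (done : List (List Int)) (cur : List Int),
      bl.foldl bStep (done ++ [cur], some v) = (done ++ [cur ++ bl.map Prod.snd], some v) := by
  intro bl
  induction bl with
  | nil => intro _ done cur; simp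
  | cons p bl ih =>
    intro h done cur
    have hp : p.1 = v := h p List.mem_cons_self
    rw [List.foldl_cons]
    have hcond : ¬ (done ++ [cur] = [] ∨ (some v : Option Int) ≠ some p.1) := by
      simp [hp]
    rw [show bStep (done ++ [cur], some v) p
        = (done ++ [cur ++ [p.2]], some p.1) by
      simp only [bStep, if_neg hcond]
      rw [List.dropLast_concat, List.getLastD_concat]]
    rw [hp, ih (fun q hq => h q (List.mem_cons_of_mem p hq)) done (cur ++ [p.2])]
    simp

-- the whole scan over a block concatenation produces one group per key
lemma b_blocks (F : Int → List (Int × Int)) :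
    ∀ ks : List Int, ks.Pairwise (· < ·) →
      (∀ v ∈ ks, (∀ p ∈ F v, p.1 = v) ∧ F v ≠ []) →
      ∀ (done : List (List Int)) (prev : Option Int),
        (done = [] ∨ ∃ u, prev = some u ∧ ∀ v ∈ ks, u < v) →
        ((ks.flatMap F).foldl bStep (done, prev)).1
          = done ++ ks.map (fun v => (F v).map Prod.snd) := by
  intro ks
  induction ks with
  | nil => intro _ _ done prev _; simp
  | cons v vs ih =>
    intro hpw hF done prev hinit
    rw [List.pairwise_cons] at hpw
    have hFv := hF v List.mem_cons_self
    obtain ⟨p, bl, hbl⟩ : ∃ p bl, F v = p :: bl := by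
      cases hE : F v with
      | nil => exact absurd hE hFv.2
      | cons p bl => exact ⟨p, bl, rfl⟩
    have hp1 : p.1 = v := hFv.1 p (by simp [hbl])
    have hcond : done = [] ∨ prev ≠ some p.1 := by
      rcases hinit with h | ⟨u, hu, hlt⟩
      · exact Or.inl h
      · right
        rw [hu, hp1]
        have := hlt v List.mem_cons_self
        intro h
        rw [Option.some_inj] at h
        omega
    have hstep : bStep (done, prev) p = (done ++ [[p.2]], some v) := by
      simp only [bStep]
      rw [if_pos (by tauto), hp1]
    rw [List.flatMap_cons, hbl, List.foldl_append, List.foldl_cons, hstep,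
      b_run v bl (fun q hq => hFv.1 q (by simp [hbl, hq])) done [p.2],
      ih hpw.2 (fun w hw => hF w (List.mem_cons_of_mem v hw)) _ (some v)
        (Or.inr ⟨v, rfl, hpw.1⟩)]
    simp [hbl]

-- under Pre_, zip(y, indexes) is enumerate(y) re-labelled with the actual index values
lemma zip_rep (indexes y : List Int) (h : y.length ≤ indexes.length) :
    y.zip indexes = (PySem.List.enumerate y 0).map
      (fun p => (p.2, PySem.List.pyGetD indexes p.1 0)) := by
  refine List.ext_getElem (by simp [PySem.List.length_enumerate]; omega) ?_
  intro k h1 h2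
  have hky : k < y.length := by simp at h1; omega
  have hki : k < indexes.length := by omega
  rw [List.getElem_zip, List.getElem_map, PySem.List.getElem_enumerate]
  simp only [Int.zero_add]
  rw [PySem.List.pyGetD_natCast, List.getD_eq_getElem _ _ hki]

lemma b_eq_spec (indexes y : List Int) (h : y.length ≤ indexes.length) :
    group_by_multiple_atts_alt indexes y
      = (PySem.List.sorted (PySem.Set.ofList y) (fun x => x) false).map (pvGrp indexes y) := by
  unfold group_by_multiple_atts_alt
  rw [sorted_pairs_blocks, List.map_fst_zip h]
  rw [b_blocks (fun v => (y.zip indexes).filter (fun p => decide (p.1 = v)))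
    _ (PySem.List.sorted_ofList_pairwise_lt y)
    (fun v hv => by
      constructor
      · intro p hp
        have hp' : p ∈ (y.zip indexes).filter (fun q => decide (q.1 = v)) := hp
        exact of_decide_eq_true ((List.mem_filter.1 hp').2)
      · have hv2 : v ∈ y := (PySem.Set.mem_ofList _ _).1 ((PySem.List.mem_sorted _ _ _ _).1 hv)
        have hv3 : v ∈ (y.zip indexes).map Prod.fst := by rw [List.map_fst_zip h]; exact hv2
        obtain ⟨p, hp, hpv⟩ := List.mem_map.1 hv3
        have : p ∈ (y.zip indexes).filter (fun q => decide (q.1 = v)) :=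
          List.mem_filter.2 ⟨hp, decide_eq_true hpv⟩
        exact List.ne_nil_of_mem this)
    [] none (Or.inl rfl)]
  rw [List.nil_append]
  refine List.map_congr_left (fun v _ => ?_)
  rw [zip_rep indexes y h, List.filter_map, List.map_map]
  unfold pvGrp
  congr 1

-- ===== VERDICT (by name: the statement is the Claim_ definition above) =====
theorem group_by_multiple_atts_spec : Claim_equal_group_by_multiple_atts := by
  intro indexes y _ hpre
  unfold Spec_group_by_multiple_atts
  rw [a_eq_spec, b_eq_spec indexes y hpre]
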